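-- pv_equiv track=rewrite | github.com/sleeky-glitch/cheaperscraper | streamlit_app.py | identify_news_segments
-- ===== SOURCE A (Python) =====
-- def identify_news_segments(text_segments):
--   headlines = []
--   current_content = ""
--
--   for text, is_bold, font_size in text_segments:
--       if is_bold and text:  # If the text is bold, consider it a headline
--           if current_content:  # If there's existing content, save it
--               headlines.append({'headline': current_content, 'content': current_content})
--               current_content = ""  # Reset for the next headline
--           current_content = text  # Start a new headline
--       elif current_content:  # If there's a current headline, append content
--           current_content += ' ' + text
--
--   # Add the last segment if it exists
--   if current_content:
--       headlines.append({'headline': current_content, 'content': current_content})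
--
--   return headlines
-- ===== SOURCE B (Python) =====
-- def identify_news_segments(text_segments):
--     def is_start(seg):
--         return bool(seg[1] and seg[0])
--     out = []
--     rest = text_segments
--     # skip segments before the first headline start
--     while rest and not is_start(rest[0]):
--         rest = rest[1:]
--     # each block: a start segment plus everything up to the next start
--     while rest:
--         body = [rest[0][0]]
--         i = 1
--         while i < len(rest) and not is_start(rest[i]):
--             body.append(rest[i][0])
--             i += 1
--         s = ' '.join(body)
--         out.append({'headline': s, 'content': s})
--         rest = rest[i:]
--     return out
-- ===== Notes on version B (the rewrite author's own statement) =====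
-- stated objective: alternative
-- what changed: Replaces A's stateful fold that grows a current_content string and flushes it on each bold boundary with a block decomposition: drop segments before the first bold non-empty segment, then repeatedly slice one headline segment plus the following non-headline segments and ' '.join their texts into one block.
import Mathlib
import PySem

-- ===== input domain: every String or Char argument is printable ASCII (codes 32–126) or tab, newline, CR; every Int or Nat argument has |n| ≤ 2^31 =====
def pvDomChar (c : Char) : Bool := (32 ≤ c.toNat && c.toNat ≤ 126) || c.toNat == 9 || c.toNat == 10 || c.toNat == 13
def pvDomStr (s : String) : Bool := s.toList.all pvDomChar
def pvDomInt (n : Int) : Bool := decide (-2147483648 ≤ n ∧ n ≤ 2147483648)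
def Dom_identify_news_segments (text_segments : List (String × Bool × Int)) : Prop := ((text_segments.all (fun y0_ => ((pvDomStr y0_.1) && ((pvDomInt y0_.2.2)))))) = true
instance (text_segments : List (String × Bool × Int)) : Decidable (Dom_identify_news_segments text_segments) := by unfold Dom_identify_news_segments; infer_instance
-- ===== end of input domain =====

-- B replaces A's single-pass accumulator-string fold by a block decomposition: drop the prefix
-- before the first bold headline, then repeatedly take one headline segment plus the following
-- non-headline segments and join their texts with ' ' (objective: alternative decomposition).


-- ===== PORT A =====
-- one loop iteration: state = (headlines, current_content)
def pvStepA (st : List (List (String × String)) × String) (seg : String × Bool × Int) :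
    List (List (String × String)) × String :=
  if seg.2.1 && !(seg.1 == "") then                  -- if is_bold and text
    (if st.2 != "" then st.1 ++ [[("headline", st.2), ("content", st.2)]] else st.1, seg.1)
  else if st.2 != "" then (st.1, st.2 ++ " " ++ seg.1)   -- elif current_content
  else st

-- the trailing 'if current_content: headlines.append(...)'
def pvFinishA (st : List (List (String × String)) × String) : List (List (String × String)) :=
  if st.2 != "" then st.1 ++ [[("headline", st.2), ("content", st.2)]] else st.1

def identify_news_segments (text_segments : List (String × Bool × Int)) : List (List (String × String)) :=
  pvFinishA (text_segments.foldl pvStepA ([], ""))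

-- ===== PORT B =====
-- is_start(seg): bool(seg[1] and seg[0])
def pvIsStart (seg : String × Bool × Int) : Bool := seg.2.1 && !(seg.1 == "")

-- inner while-loops: the body collected up to the next start is a takeWhile, the remaining
-- suffix a dropWhile (Source B's index i marks exactly that split point)
def pvBlocks : List (String × Bool × Int) → List (List (String × String))
  | [] => []
  | s :: rest =>
      let j := PySem.Str.join " " (s.1 :: (rest.takeWhile (fun x => !pvIsStart x)).map (·.1))
      [("headline", j), ("content", j)] :: pvBlocks (rest.dropWhile (fun x => !pvIsStart x))
termination_by xs => xs.length
decreasing_by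
  exact Nat.lt_succ_of_le (List.length_dropWhile_le _ _)

def identify_news_segments_alt (text_segments : List (String × Bool × Int)) : List (List (String × String)) :=
  pvBlocks (text_segments.dropWhile (fun x => !pvIsStart x))

-- ===== PRECONDITION & SPEC =====
def Spec_identify_news_segments (text_segments : List (String × Bool × Int)) (out : List (List (String × String))) : Prop := out = identify_news_segments_alt text_segments
instance (text_segments : List (String × Bool × Int)) (out : List (List (String × String))) : Decidable (Spec_identify_news_segments text_segments out) := by unfold Spec_identify_news_segments; infer_instance

-- ===== CLAIM (what is proved, stated in full; the proofs are below) =====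
def Claim_equal_identify_news_segments : Prop := ∀ (text_segments : List (String × Bool × Int)), Dom_identify_news_segments text_segments → Spec_identify_news_segments text_segments (identify_news_segments text_segments)

-- ===== LEMMAS AND PROOFS =====

theorem pv_append_ne_empty (a b : String) (h : a ≠ "") : a ++ b ≠ "" := by
  intro hc
  apply h
  have := congrArg String.toList hc
  simp at this
  exact String.toList_inj.mp (by simp [this.1])

theorem pv_join_singleton (a : String) : PySem.Str.join " " [a] = a := by
  apply String.toList_inj.mp
  simp [PySem.Str.toList_join, PySem.Chars.join_singleton]

-- absorbing an already-appended piece back into the join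
theorem pv_join_shift (a b : String) (ts : List String) :
    PySem.Str.join " " ((a ++ " " ++ b) :: ts) = PySem.Str.join " " (a :: b :: ts) := by
  apply String.toList_inj.mp
  cases ts with
  | nil =>
      simp [PySem.Str.toList_join, PySem.Chars.join_singleton, PySem.Chars.join_cons_cons]
  | cons t ts =>
      simp [PySem.Str.toList_join, PySem.Chars.join_cons_cons]

-- main invariant: a running nonempty current_content 'cur' together with the rest of the loop
-- equals B's current block (cur joined with the following non-start texts) plus B's later blocks
theorem pv_loop (rest : List (String × Bool × Int)) (acc : List (List (String × String)))
    (cur : String) (h : cur ≠ "") :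
    pvFinishA (rest.foldl pvStepA (acc, cur)) =
      acc ++ ((fun j => [("headline", j), ("content", j)])
                (PySem.Str.join " " (cur :: (rest.takeWhile (fun x => !pvIsStart x)).map (·.1)))
              :: pvBlocks (rest.dropWhile (fun x => !pvIsStart x))) := by
  induction rest generalizing acc cur with
  | nil =>
      simp [pvFinishA, h, pv_join_singleton, pvBlocks]
  | cons s r ih =>
      by_cases hs : pvIsStart s = true
      · have hs1 : s.1 ≠ "" := by
          simp [pvIsStart] at hs
          exact hs.2
        have hstep : pvStepA (acc, cur) s =
            (acc ++ [[("headline", cur), ("content", cur)]], s.1) := by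
          simp [pvStepA, pvIsStart] at hs ⊢
          simp [hs.1, hs.2, h]
        rw [List.foldl_cons, hstep, ih _ _ hs1]
        rw [List.takeWhile_cons, List.dropWhile_cons]
        simp [hs, pvBlocks, pv_join_singleton]
      · have hne : cur ++ " " ++ s.1 ≠ "" := pv_append_ne_empty _ _ (pv_append_ne_empty _ _ h)
        have hstep : pvStepA (acc, cur) s = (acc, cur ++ " " ++ s.1) := by
          simp [pvIsStart] at hs
          have hn : ¬(s.2.1 = true ∧ ¬s.1 = "") := fun hc => hc.2 (hs hc.1)
          simp [pvStepA, hn, h]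
        rw [List.foldl_cons, hstep, ih _ _ hne]
        rw [List.takeWhile_cons, List.dropWhile_cons]
        simp [hs, pv_join_shift]

-- before the first start segment the loop state stays ([], "") — the prefix is dropped
theorem pv_skip (rest : List (String × Bool × Int)) (acc : List (List (String × String))) :
    pvFinishA (rest.foldl pvStepA (acc, "")) =
      acc ++ pvBlocks (rest.dropWhile (fun x => !pvIsStart x)) := by
  induction rest generalizing acc with
  | nil => simp [pvFinishA, pvBlocks]
  | cons s r ih =>
      by_cases hs : pvIsStart s = true
      · have hs1 : s.1 ≠ "" := by
          simp [pvIsStart] at hs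
          exact hs.2
        have hstep : pvStepA (acc, "") s = (acc, s.1) := by
          simp [pvStepA, pvIsStart] at hs ⊢
          simp [hs.1, hs.2]
        rw [List.foldl_cons, hstep, pv_loop _ _ _ hs1, List.dropWhile_cons]
        simp [hs, pvBlocks]
      · have hstep : pvStepA (acc, "") s = (acc, "") := by
          simp [pvStepA, pvIsStart] at hs ⊢
          intro hb
          exact hs hb
        rw [List.foldl_cons, hstep, ih, List.dropWhile_cons]
        simp [hs]

-- ===== VERDICT (by name: the statement is the Claim_ definition above) =====
theorem identify_news_segments_spec : Claim_equal_identify_news_segments := by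
  intro xs _
  show identify_news_segments xs = identify_news_segments_alt xs
  unfold identify_news_segments identify_news_segments_alt
  simpa using pv_skip xs []
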